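-- pv_equiv track=rewrite | github.com/Szubie/Misc | 6.00.1x Files/Problem Sets/Week 4/ProblemSet4/isWordValid.py | isWordValid
-- ===== SOURCE A (Python) =====
-- def isWordValid(word, hand, wordList):
--     """
--     Returns True if word is in the wordList and is entirely
--     composed of letters in the hand. Otherwise, returns False.
--
--     Does not mutate hand or wordList.
--
--     word: string
--     hand: dictionary (string -> int)
--     wordList: list of lowercase strings
--     """
--     UpHand = {}
--     UpHand = hand.copy()
--
--     for letter in word:
--         if letter not in UpHand:
--         #This is what you have to use. "if....not in..." rather than "if _ in _ is not True". Likewise above for the wordList check. Very important to remember this!!!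
--             return False
--         if letter in UpHand:
--             if UpHand[letter] == 0:
--                 return False
--             else:
--                 UpHand[letter] -= 1
--
--     return True
-- ===== SOURCE B (Python) =====
-- def isWordValid(word, hand, wordList):
--     """Frequency-table version: count each letter of word once, then compare
--     the aggregate counts against hand (no copy of hand, no decrement loop).
--     Ignores wordList, exactly as the original does; does not mutate hand."""
--     need = {}
--     for c in word:
--         need[c] = need.get(c, 0) + 1
--     return all(n <= hand.get(c, 0) for c, n in need.items())
-- ===== Notes on version B (the rewrite author's own statement) =====
-- stated objective: idiomatic
-- what changed: B builds a letter-frequency table of the word once and compares each aggregate count against hand.get(c, 0), instead of copying the hand dict and decrementing it letter by letter with early returns.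
-- intended difference: On words whose every letter is present in hand with a negative or sufficient count and at least one needed letter's count is negative, A returns True (its decrement loop never hits 0 on a negative count, treating it as inexhaustible), while B returns False, the intended result since a negative count means the letter is not available. — e.g. on isWordValid("a", [("a", -1)], []): A returns true, B returns false
import Mathlib
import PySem

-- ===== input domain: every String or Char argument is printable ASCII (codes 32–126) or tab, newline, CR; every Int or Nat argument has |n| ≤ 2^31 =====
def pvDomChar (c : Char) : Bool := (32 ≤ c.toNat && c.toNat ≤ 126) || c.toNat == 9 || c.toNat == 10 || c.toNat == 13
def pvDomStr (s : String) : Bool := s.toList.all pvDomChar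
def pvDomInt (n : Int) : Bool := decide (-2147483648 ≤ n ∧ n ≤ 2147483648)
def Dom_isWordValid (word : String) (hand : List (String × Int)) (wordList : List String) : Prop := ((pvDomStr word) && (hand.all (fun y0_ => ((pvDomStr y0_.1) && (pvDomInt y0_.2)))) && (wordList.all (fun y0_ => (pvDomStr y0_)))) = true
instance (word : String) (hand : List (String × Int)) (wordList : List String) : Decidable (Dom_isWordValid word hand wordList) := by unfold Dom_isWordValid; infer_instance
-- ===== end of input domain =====

-- B replaces A's hand-copy-and-decrement loop by a frequency table of the word compared
-- against hand (same cost, more idiomatic); on hands with negative counts A's loop never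
-- exhausts them while B treats them as unavailable (the intended difference D_ below).
-- Neither implementation mutates its arguments.

-- ===== PORT A =====
-- a letter of the word, as the single-character string that keys the hand dict
def pvKey (c : Char) : String := String.ofList [c]

-- the 'for letter in word' loop over the copied hand, with its two early returns
def isWordValidLoop : List Char → PySem.Dict String Int → Bool
  | [], _ => true
  | c :: rest, d =>
    match d.get? (pvKey c) with
    | none => false                        -- 'if letter not in UpHand: return False'
    | some v =>
      if v == 0 then false                 -- 'if UpHand[letter] == 0: return False'
      else isWordValidLoop rest (d.insert (pvKey c) (v - 1))   -- 'UpHand[letter] -= 1'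

def isWordValid (word : String) (hand : List (String × Int)) (wordList : List String) : Bool :=
  isWordValidLoop word.toList (PySem.Dict.ofList hand)         -- 'UpHand = hand.copy()'

-- ===== PORT B =====
def isWordValid_alt (word : String) (hand : List (String × Int)) (wordList : List String) : Bool :=
  -- 'need = {}; for c in word: need[c] = need.get(c, 0) + 1'
  let need : PySem.Dict String Int :=
    (word.toList.map pvKey).foldl (fun d k => d.insert k (d.getD k 0 + 1)) PySem.Dict.empty
  -- 'all(n <= hand.get(c, 0) for c, n in need.items())'
  need.items.all (fun p => decide (p.2 ≤ (PySem.Dict.ofList hand).getD p.1 0))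

-- ===== PRECONDITION & SPEC =====
-- On words whose every letter is present in hand with a negative or sufficient count and at
-- least one needed letter's count is negative, A returns True (its decrement loop never hits 0
-- on a negative count, treating it as inexhaustible) while B returns False, the intended result
-- since a negative count means the letter is not available.
def D_isWordValid (word : String) (hand : List (String × Int)) (wordList : List String) : Prop :=
  (word.toList.all (fun c =>
      (PySem.Dict.ofList hand).contains (pvKey c) &&
      (decide ((PySem.Dict.ofList hand).getD (pvKey c) 0 < 0) ||
       decide ((word.toList.count c : Int) ≤ (PySem.Dict.ofList hand).getD (pvKey c) 0)))) = true ∧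
  (word.toList.any (fun c =>
      decide ((PySem.Dict.ofList hand).getD (pvKey c) 0 < 0))) = true
instance (word : String) (hand : List (String × Int)) (wordList : List String) : Decidable (D_isWordValid word hand wordList) := by unfold D_isWordValid; infer_instance

def Spec_isWordValid (word : String) (hand : List (String × Int)) (wordList : List String) (out : Bool) : Prop := ¬ D_isWordValid word hand wordList → out = isWordValid_alt word hand wordList
instance (word : String) (hand : List (String × Int)) (wordList : List String) (out : Bool) : Decidable (Spec_isWordValid word hand wordList out) := by unfold Spec_isWordValid; infer_instance

def pvDiffWitness_isWordValid : String × (List (String × Int)) × List String := ("a", [("a", -1)], [])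
def pvDiffWitnessOut_isWordValid : Bool × Bool := (true, false)

-- ===== CLAIM (what is proved, stated in full; the proofs are below) =====
def Claim_unchanged_isWordValid : Prop := ∀ (word : String) (hand : List (String × Int)) (wordList : List String), Dom_isWordValid word hand wordList → Spec_isWordValid word hand wordList (isWordValid word hand wordList)
def Claim_changed_isWordValid : Prop := Dom_isWordValid (pvDiffWitness_isWordValid.1) (pvDiffWitness_isWordValid.2.1) (pvDiffWitness_isWordValid.2.2) ∧ D_isWordValid (pvDiffWitness_isWordValid.1) (pvDiffWitness_isWordValid.2.1) (pvDiffWitness_isWordValid.2.2) ∧ isWordValid (pvDiffWitness_isWordValid.1) (pvDiffWitness_isWordValid.2.1) (pvDiffWitness_isWordValid.2.2) = pvDiffWitnessOut_isWordValid.1 ∧ isWordValid_alt (pvDiffWitness_isWordValid.1) (pvDiffWitness_isWordValid.2.1) (pvDiffWitness_isWordValid.2.2) = pvDiffWitnessOut_isWordValid.2 ∧ pvDiffWitnessOut_isWordValid.1 ≠ pvDiffWitnessOut_isWordValid.2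
def Claim_exact_isWordValid : Prop := ∀ (word : String) (hand : List (String × Int)) (wordList : List String), Dom_isWordValid word hand wordList → D_isWordValid word hand wordList → isWordValid word hand wordList ≠ isWordValid_alt word hand wordList

-- ===== LEMMAS AND PROOFS =====
lemma pvKey_inj {c c' : Char} (h : pvKey c = pvKey c') : c = c' := by
  have h2 := congrArg String.toList h
  simpa [pvKey, String.toList_ofList] using h2

-- characterisation of A's loop: it succeeds iff every letter is present and its
-- current count is negative or at least the number of occurrences still to consume
lemma isWordValidLoop_eq_true_iff (cs : List Char) (d : PySem.Dict String Int) :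
    isWordValidLoop cs d = true ↔
      ∀ c ∈ cs, ∃ v, d.get? (pvKey c) = some v ∧ (v < 0 ∨ (cs.count c : Int) ≤ v) := by
  induction cs generalizing d with
  | nil => simp [isWordValidLoop]
  | cons c rest ih =>
    cases hg : d.get? (pvKey c) with
    | none =>
      simp only [isWordValidLoop, hg, Bool.false_eq_true, false_iff]
      intro h
      obtain ⟨v, hv, _⟩ := h c (by simp)
      rw [hg] at hv; cases hv
    | some v =>
      by_cases hv0 : v = 0
      · subst hv0
        simp only [isWordValidLoop, hg, BEq.rfl, if_true, Bool.false_eq_true, false_iff]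
        intro h
        obtain ⟨w, hw, hcond⟩ := h c (by simp)
        rw [hg] at hw
        obtain rfl : (0 : Int) = w := Option.some.inj hw
        have hcnt : 0 < (c :: rest).count c := List.count_pos_iff.mpr (by simp)
        rcases hcond with h1 | h1 <;> omega
      · have hne : (v == 0) = false := by simp [hv0]
        simp only [isWordValidLoop, hg, hne, Bool.false_eq_true, if_false]
        rw [ih]
        constructor
        · intro h c' hc'
          by_cases hcc : c' = c
          · subst hcc
            refine ⟨v, hg, ?_⟩
            by_cases hmem : c' ∈ rest
            · obtain ⟨w, hw, hcond⟩ := h c' hmem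
              rw [PySem.Dict.get?_insert_self] at hw
              obtain rfl : v - 1 = w := Option.some.inj hw
              have : (c' :: rest).count c' = rest.count c' + 1 := by
                simp
              rcases hcond with h1 | h1 <;> [left; right] <;> omega
            · have : (c' :: rest).count c' = 1 := by
                simp [List.count_eq_zero_of_not_mem hmem]
              rcases Int.lt_or_lt_of_ne hv0 with h1 | h1
              · left; exact h1
              · right; omega
          · obtain ⟨w, hw, hcond⟩ := h c' (by
              rcases List.mem_cons.mp hc' with h1 | h1
              · exact absurd h1 hcc
              · exact h1)
            have hkne : pvKey c' ≠ pvKey c := fun he => hcc (pvKey_inj he)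
            rw [PySem.Dict.get?_insert_of_ne _ _ hkne] at hw
            refine ⟨w, hw, ?_⟩
            have : (c :: rest).count c' = rest.count c' := by
              simp [Ne.symm hcc]
            rcases hcond with h1 | h1 <;> [left; right] <;> omega
        · intro h c' hc'
          by_cases hcc : c' = c
          · subst hcc
            obtain ⟨w, hw, hcond⟩ := h c' (by simp)
            rw [hg] at hw
            obtain rfl : v = w := Option.some.inj hw
            refine ⟨v - 1, PySem.Dict.get?_insert_self _ _ _, ?_⟩
            have : (c' :: rest).count c' = rest.count c' + 1 := by
              simp
            rcases hcond with h1 | h1 <;> [left; right] <;> omega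
          · obtain ⟨w, hw, hcond⟩ := h c' (by simp [hc'])
            have hkne : pvKey c' ≠ pvKey c := fun he => hcc (pvKey_inj he)
            refine ⟨w, by rw [PySem.Dict.get?_insert_of_ne _ _ hkne]; exact hw, ?_⟩
            have : (c :: rest).count c' = rest.count c' := by
              simp [Ne.symm hcc]
            rcases hcond with h1 | h1 <;> [left; right] <;> omega

-- characterisation of B: it succeeds iff every letter's multiplicity in the word
-- is at most its count in the hand (missing letters count as 0)
lemma isWordValid_alt_eq_true_iff (word : String) (hand : List (String × Int)) (wordList : List String) :
    isWordValid_alt word hand wordList = true ↔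
      ∀ c ∈ word.toList,
        (word.toList.count c : Int) ≤ (PySem.Dict.ofList hand).getD (pvKey c) 0 := by
  show ((PySem.Dict.counter (word.toList.map pvKey)).items.all
      (fun p => decide (p.2 ≤ (PySem.Dict.ofList hand).getD p.1 0))) = true ↔ _
  rw [PySem.Dict.items_counter]
  simp only [List.all_map, List.all_eq_true, Function.comp, decide_eq_true_eq]
  constructor
  · intro h c hc
    have hk : pvKey c ∈ PySem.Set.ofList (word.toList.map pvKey) :=
      (PySem.Set.mem_ofList _ _).mpr (List.mem_map_of_mem hc)
    have := h _ hk
    simpa [List.count_map_of_injective _ pvKey (fun _ _ => pvKey_inj)] using this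
  · intro h k hk
    have hk' : k ∈ word.toList.map pvKey := (PySem.Set.mem_ofList _ _).mp hk
    obtain ⟨c, hc, rfl⟩ := List.mem_map.mp hk'
    simpa [List.count_map_of_injective _ pvKey (fun _ _ => pvKey_inj)] using h c hc

-- one letter of the word: its multiplicity is positive
lemma count_pos_int {c : Char} {cs : List Char} (h : c ∈ cs) :
    (1 : Int) ≤ (cs.count c : Int) := by
  have := List.count_pos_iff.mpr h
  omega

-- the change region, in propositional form
lemma D_iff (word : String) (hand : List (String × Int)) (wordList : List String) :
    D_isWordValid word hand wordList ↔
      (∀ c ∈ word.toList, (PySem.Dict.ofList hand).contains (pvKey c) = true ∧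
          ((PySem.Dict.ofList hand).getD (pvKey c) 0 < 0 ∨
           (word.toList.count c : Int) ≤ (PySem.Dict.ofList hand).getD (pvKey c) 0)) ∧
      (∃ c ∈ word.toList, (PySem.Dict.ofList hand).getD (pvKey c) 0 < 0) := by
  unfold D_isWordValid
  simp [List.all_eq_true, List.any_eq_true]

-- ===== VERDICT (by name: the statement is the Claim_ definition above) =====
theorem isWordValid_spec : Claim_unchanged_isWordValid := by
  unfold Claim_unchanged_isWordValid
  intro word hand wordList _ hnD
  rw [D_iff] at hnD
  rw [Bool.eq_iff_iff, isWordValid, isWordValidLoop_eq_true_iff,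
    isWordValid_alt_eq_true_iff]
  constructor
  · intro h c hc
    have hfirst : ∀ c ∈ word.toList,
        (PySem.Dict.ofList hand).contains (pvKey c) = true ∧
        ((PySem.Dict.ofList hand).getD (pvKey c) 0 < 0 ∨
         (word.toList.count c : Int) ≤ (PySem.Dict.ofList hand).getD (pvKey c) 0) := by
      intro c' hc'
      obtain ⟨v, hv, hcond⟩ := h c' hc'
      refine ⟨by rw [PySem.Dict.contains_eq_isSome_get?, hv]; rfl, ?_⟩
      rw [PySem.Dict.getD_of_get?_eq_some _ 0 hv]
      exact hcond
    have hnoneg : ∀ c ∈ word.toList, ¬ (PySem.Dict.ofList hand).getD (pvKey c) 0 < 0 := by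
      intro c' hc' hlt
      exact hnD ⟨hfirst, ⟨c', hc', hlt⟩⟩
    obtain ⟨v, hv, hcond⟩ := h c hc
    rw [PySem.Dict.getD_of_get?_eq_some _ 0 hv]
    have := hnoneg c hc
    rw [PySem.Dict.getD_of_get?_eq_some _ 0 hv] at this
    rcases hcond with h1 | h1
    · omega
    · exact h1
  · intro h c hc
    have hle := h c hc
    have hpos : (1 : Int) ≤ (word.toList.count c : Int) := count_pos_int hc
    cases hv : (PySem.Dict.ofList hand).get? (pvKey c) with
    | none =>
      rw [PySem.Dict.getD_of_get?_eq_none _ 0 hv] at hle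
      exact absurd hle (by omega)
    | some v =>
      rw [PySem.Dict.getD_of_get?_eq_some _ 0 hv] at hle
      exact ⟨v, rfl, Or.inr hle⟩

set_option maxRecDepth 100000 in
theorem isWordValid_changed : Claim_changed_isWordValid := by
  unfold Claim_changed_isWordValid; decide

theorem isWordValid_tight : Claim_exact_isWordValid := by
  unfold Claim_exact_isWordValid
  intro word hand wordList _ hD heq
  rw [D_iff] at hD
  obtain ⟨hall, c0, hc0, hneg⟩ := hD
  have hA : isWordValid word hand wordList = true := by
    rw [isWordValid, isWordValidLoop_eq_true_iff]
    intro c hc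
    obtain ⟨hcont, hcond⟩ := hall c hc
    cases hv : (PySem.Dict.ofList hand).get? (pvKey c) with
    | none =>
      rw [PySem.Dict.contains_eq_isSome_get?, hv] at hcont
      cases hcont
    | some v =>
      rw [PySem.Dict.getD_of_get?_eq_some _ 0 hv] at hcond
      exact ⟨v, rfl, hcond⟩
  have hB : isWordValid_alt word hand wordList = false := by
    rw [← Bool.not_eq_true, isWordValid_alt_eq_true_iff]
    intro h
    have := h c0 hc0
    have := count_pos_int hc0
    omega
  rw [hA, hB] at heq
  cases heq
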